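-- pv_equiv track=rewrite | github.com/Macmachi/nanobot_skill_vector | memory_skill_script.py | _split_memory_sections
-- ===== SOURCE A (Python) =====
-- def _split_memory_sections(text: str) -> list[tuple[str, str]]:
--     """Split MEMORY.md by markdown section (## title)."""
--     sections: list[tuple[str, str]] = []
--     current_title = "general"
--     current_body: list[str] = []
--     for line in text.splitlines():
--         if line.startswith("## "):
--             if current_body:
--                 sections.append((current_title, "\n".join(current_body).strip()))
--             current_title = line[3:].strip()
--             current_body = []
--         else:
--             current_body.append(line)
--     if current_body:
--         sections.append((current_title, "\n".join(current_body).strip()))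
--     return [(t, b) for t, b in sections if b]
-- ===== SOURCE B (Python) =====
-- def _split_memory_sections(text: str) -> list[tuple[str, str]]:
--     """Split MEMORY.md by markdown section (## title)."""
--     def split_at_header(lines):
--         for i, line in enumerate(lines):
--             if line.startswith("## "):
--                 return lines[:i], (line, lines[i + 1:])
--         return lines, None
--
--     def go(title, lines):
--         pre, rest = split_at_header(lines)
--         body = "\n".join(pre).strip()
--         head = [(title, body)] if body else []
--         if rest is None:
--             return head
--         header_line, rs = rest
--         return head + go(header_line[3:].strip(), rs)
--
--     return go("general", text.splitlines())
-- ===== Notes on version B (the rewrite author's own statement) =====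
-- stated objective: alternative
-- what changed: Replaced the single stateful accumulator loop (pending title/body, mid-loop and final flush, then a filter pass) by a recursive decomposition: split at the first markdown header line, emit the stripped body before it if non-empty, and recurse on the remainder; no section list or pending state is maintained.
import Mathlib
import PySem

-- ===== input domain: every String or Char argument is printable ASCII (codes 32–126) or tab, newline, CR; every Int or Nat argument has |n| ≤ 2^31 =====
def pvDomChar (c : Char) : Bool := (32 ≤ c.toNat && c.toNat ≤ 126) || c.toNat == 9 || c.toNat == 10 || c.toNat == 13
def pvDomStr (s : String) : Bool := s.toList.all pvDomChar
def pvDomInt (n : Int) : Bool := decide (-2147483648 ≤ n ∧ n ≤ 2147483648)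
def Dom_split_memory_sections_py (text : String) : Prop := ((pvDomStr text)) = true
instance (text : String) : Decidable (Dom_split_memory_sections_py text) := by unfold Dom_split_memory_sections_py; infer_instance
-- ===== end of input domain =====

-- B replaces A's stateful accumulator loop by recursion at the first markdown header line; objective: alternative decomposition (same cost).

-- ===== PORT A =====
-- loop body of A: state = (sections, current_title, current_body)
def pvStepA (st : List (String × String) × String × List String) (line : String) :
    List (String × String) × String × List String :=
  if PySem.Str.startswith line "## " then
    ((if st.2.2 ≠ [] then st.1 ++ [(st.2.1, PySem.Str.strip (PySem.Str.join "\n" st.2.2))] else st.1),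
     PySem.Str.strip (PySem.Str.slice line (some 3) none), [])
  else
    (st.1, st.2.1, st.2.2 ++ [line])

-- A's final 'if current_body: sections.append(...)'
def pvFlushA (st : List (String × String) × String × List String) : List (String × String) :=
  if st.2.2 ≠ [] then st.1 ++ [(st.2.1, PySem.Str.strip (PySem.Str.join "\n" st.2.2))] else st.1

def split_memory_sections_py (text : String) : List (String × String) :=
  (pvFlushA ((PySem.Str.splitlines text).foldl pvStepA ([], "general", []))).filter
    (fun tb => tb.2 != "")

-- ===== PORT B =====
-- Source B's split_at_header: lines before the first '## ' line, and (that line, the rest) if any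
def pvSplitAtHeader : List String → List String × Option (String × List String)
  | [] => ([], none)
  | l :: ls =>
    if PySem.Str.startswith l "## " then ([], some (l, ls))
    else
      let r := pvSplitAtHeader ls
      (l :: r.1, r.2)

theorem pvSplitAtHeader_rest_length : ∀ (ls : List String) (hl : String) (rs : List String),
    (pvSplitAtHeader ls).2 = some (hl, rs) → rs.length < ls.length := by
  intro ls
  induction ls with
  | nil => intro hl rs h; simp [pvSplitAtHeader] at h
  | cons l ls ih =>
    intro hl rs h
    simp only [pvSplitAtHeader] at h
    by_cases hh : PySem.Str.startswith l "## " = true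
    · rw [if_pos hh] at h
      simp only [Option.some.injEq, Prod.mk.injEq] at h
      simp [← h.2]
    · rw [if_neg hh] at h
      have := ih hl rs h
      simp only [List.length_cons]
      omega

-- Source B's go
def pvGoB (title : String) (lines : List String) : List (String × String) :=
  match h : pvSplitAtHeader lines with
  | (pre, none) =>
      let body := PySem.Str.strip (PySem.Str.join "\n" pre)
      if body != "" then [(title, body)] else []
  | (pre, some (hl, rs)) =>
      let body := PySem.Str.strip (PySem.Str.join "\n" pre)
      (if body != "" then [(title, body)] else []) ++
        pvGoB (PySem.Str.strip (PySem.Str.slice hl (some 3) none)) rs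
termination_by lines.length
decreasing_by exact pvSplitAtHeader_rest_length lines hl rs (by rw [h])

def split_memory_sections_py_alt (text : String) : List (String × String) :=
  pvGoB "general" (PySem.Str.splitlines text)

-- ===== PRECONDITION & SPEC =====
def Spec_split_memory_sections_py (text : String) (out : List (String × String)) : Prop := out = split_memory_sections_py_alt text
instance (text : String) (out : List (String × String)) : Decidable (Spec_split_memory_sections_py text out) := by unfold Spec_split_memory_sections_py; infer_instance

-- ===== CLAIM (what is proved, stated in full; the proofs are below) =====
def Claim_equal_split_memory_sections_py : Prop := ∀ (text : String), Dom_split_memory_sections_py text → Spec_split_memory_sections_py text (split_memory_sections_py text)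

-- ===== LEMMAS AND PROOFS =====

theorem pvFold_append (ls : List String) : ∀ (secs : List (String × String)) (t : String) (b : List String),
    ls.foldl pvStepA (secs, t, b) =
      (secs ++ (ls.foldl pvStepA ([], t, b)).1, (ls.foldl pvStepA ([], t, b)).2) := by
  induction ls with
  | nil => intro secs t b; simp
  | cons l ls ih =>
    intro secs t b
    simp only [List.foldl_cons]
    by_cases hh : PySem.Str.startswith l "## " = true
    · rw [show pvStepA (secs, t, b) l =
          (secs ++ (if b ≠ [] then [(t, PySem.Str.strip (PySem.Str.join "\n" b))] else []),
           PySem.Str.strip (PySem.Str.slice l (some 3) none), []) from by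
            simp only [pvStepA]; rw [if_pos hh]; split_ifs <;> simp,
        show pvStepA ([], t, b) l =
          ((if b ≠ [] then [(t, PySem.Str.strip (PySem.Str.join "\n" b))] else []),
           PySem.Str.strip (PySem.Str.slice l (some 3) none), []) from by
            simp only [pvStepA]; rw [if_pos hh]; split_ifs <;> simp]
      conv_lhs => rw [ih]
      conv_rhs => rw [ih]
      simp
    · rw [show pvStepA (secs, t, b) l = (secs, t, b ++ [l]) from by
            simp only [pvStepA]; rw [if_neg hh],
          show pvStepA ([], t, b) l = ([], t, b ++ [l]) from by
            simp only [pvStepA]; rw [if_neg hh]]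
      exact ih secs t (b ++ [l])

theorem pvFlushA_append (secs X : List (String × String)) (tb : String × List String) :
    pvFlushA (secs ++ X, tb) = secs ++ pvFlushA (X, tb) := by
  simp only [pvFlushA]
  split_ifs <;> simp

theorem pvFilter_flush_nil (t : String) (b : List String) :
    (pvFlushA ([], t, b)).filter (fun tb => tb.2 != "") =
      (if PySem.Str.strip (PySem.Str.join "\n" b) != ""
        then [(t, PySem.Str.strip (PySem.Str.join "\n" b))] else []) := by
  cases b with
  | nil =>
    have h1 : PySem.Str.join "\n" ([] : List String) = "" := by decide
    simp [pvFlushA, h1]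
    decide
  | cons x xs =>
    have hne : (x :: xs) ≠ ([] : List String) := by simp
    simp only [pvFlushA]
    rw [if_pos hne]
    simp [List.filter_singleton]

theorem pvGoB_eq (t : String) (ls : List String) :
    pvGoB t ls =
      (if PySem.Str.strip (PySem.Str.join "\n" (pvSplitAtHeader ls).1) != ""
        then [(t, PySem.Str.strip (PySem.Str.join "\n" (pvSplitAtHeader ls).1))] else []) ++
      (match (pvSplitAtHeader ls).2 with
        | none => []
        | some (hl, rs) => pvGoB (PySem.Str.strip (PySem.Str.slice hl (some 3) none)) rs) := by
  conv_lhs => rw [pvGoB]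
  split
  · next pre h => rw [h]; simp
  · next pre hl rs h => rw [h]

theorem pvMain (ls : List String) : ∀ (t : String) (b : List String),
    (pvFlushA (ls.foldl pvStepA ([], t, b))).filter (fun tb => tb.2 != "") =
      (if PySem.Str.strip (PySem.Str.join "\n" (b ++ (pvSplitAtHeader ls).1)) != ""
        then [(t, PySem.Str.strip (PySem.Str.join "\n" (b ++ (pvSplitAtHeader ls).1)))] else []) ++
      (match (pvSplitAtHeader ls).2 with
        | none => []
        | some (hl, rs) => pvGoB (PySem.Str.strip (PySem.Str.slice hl (some 3) none)) rs) := by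
  induction ls with
  | nil =>
    intro t b
    simp only [List.foldl_nil, pvSplitAtHeader]
    rw [pvFilter_flush_nil]
    simp
  | cons l ls ih =>
    intro t b
    simp only [List.foldl_cons]
    by_cases hh : PySem.Str.startswith l "## " = true
    · rw [show pvStepA ([], t, b) l =
          (pvFlushA ([], t, b), PySem.Str.strip (PySem.Str.slice l (some 3) none), []) from by
            simp only [pvStepA, pvFlushA]; rw [if_pos hh]]
      rw [pvFold_append]
      rw [pvFlushA_append]
      rw [List.filter_append, pvFilter_flush_nil]
      rw [Prod.mk.eta]
      rw [ih]
      have hs : pvSplitAtHeader (l :: ls) = ([], some (l, ls)) := by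
        simp only [pvSplitAtHeader]; rw [if_pos hh]
      rw [hs]
      have hg := pvGoB_eq (PySem.Str.strip (PySem.Str.slice l (some 3) none)) ls
      simp [hg]
    · rw [show pvStepA ([], t, b) l = ([], t, b ++ [l]) from by
            simp only [pvStepA]; rw [if_neg hh]]
      rw [ih]
      have hs : pvSplitAtHeader (l :: ls) = (l :: (pvSplitAtHeader ls).1, (pvSplitAtHeader ls).2) := by
        simp only [pvSplitAtHeader]; rw [if_neg hh]
      rw [hs]
      simp [List.append_assoc]

-- ===== VERDICT (by name: the statement is the Claim_ definition above) =====
theorem split_memory_sections_py_spec : Claim_equal_split_memory_sections_py := by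
  intro text _
  unfold Spec_split_memory_sections_py split_memory_sections_py split_memory_sections_py_alt
  rw [pvMain, pvGoB_eq]
  simp
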